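-- pv_equiv track=rewrite | github.com/Martchel/code | film/Bibliothèque/fonctions.py | borrow
-- ===== SOURCE A (Python) =====
-- from collections import defaultdict
--
-- def borrow(friends):
--     borrow_films = defaultdict(list)
--
--     for friend_borrow in friends:
--         friend = friend_borrow[0] if len(friend_borrow) > 1 else None
--         movie = friend_borrow[1] if len(friend_borrow) > 1 else None
--         if friend and movie:
--             borrow_films[friend].append(movie)
--
--     list_borrow = [(friend, borrowed_movies) for friend, borrowed_movies in borrow_films.items()]
--     return list_borrow
-- ===== SOURCE B (Python) =====
-- def borrow(friends):
--     # Two-pass nested grouping: first collect distinct valid friends in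
--     # first-appearance order, then rescan friends per key to gather movies.
--     keys = []
--     for entry in friends:
--         if len(entry) > 1 and entry[0] and entry[1] and entry[0] not in keys:
--             keys.append(entry[0])
--     result = []
--     for friend in keys:
--         movies = [entry[1] for entry in friends
--                   if len(entry) > 1 and entry[0] and entry[1] and entry[0] == friend]
--         result.append((friend, movies))
--     return result
-- ===== Notes on version B (the rewrite author's own statement) =====
-- stated objective: alternative
-- what changed: Replaces the single defaultdict grouping pass with a two-pass nested traversal: one pass collecting distinct valid friends in first-appearance order, then a rescan of the input per friend to collect that friend's movies in order.
import Mathlib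
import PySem

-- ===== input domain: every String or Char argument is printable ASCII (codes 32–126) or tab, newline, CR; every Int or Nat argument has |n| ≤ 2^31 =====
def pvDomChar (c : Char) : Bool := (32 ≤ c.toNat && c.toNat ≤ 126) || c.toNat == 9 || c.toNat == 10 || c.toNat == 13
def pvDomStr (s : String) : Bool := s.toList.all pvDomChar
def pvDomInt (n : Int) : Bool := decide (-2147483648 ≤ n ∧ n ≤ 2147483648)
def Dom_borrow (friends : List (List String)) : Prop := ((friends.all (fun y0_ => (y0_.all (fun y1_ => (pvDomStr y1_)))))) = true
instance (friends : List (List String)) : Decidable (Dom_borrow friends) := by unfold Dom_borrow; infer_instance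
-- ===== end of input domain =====

-- B replaces A's single defaultdict grouping pass by a two-pass nested traversal
-- (distinct valid friends first, then a rescan per friend); alternative, not faster.

-- ===== PORT A =====
def borrowStepA (d : PySem.Dict String (List String)) (e : List String) :
    PySem.Dict String (List String) :=
  let friend : Option String := if 1 < e.length then PySem.List.pyGet? e 0 else none
  let movie : Option String := if 1 < e.length then PySem.List.pyGet? e 1 else none
  match friend, movie with
  | some f, some m => if f ≠ "" ∧ m ≠ "" then d.modify f [] (· ++ [m]) else d
  | _, _ => d

def borrow (friends : List (List String)) : List (String × List String) :=
  ((friends.foldl borrowStepA PySem.Dict.empty).items).map (fun p => (p.1, p.2))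

-- ===== PORT B =====
def borrowValidB (e : List String) : Bool :=
  decide (1 < e.length) && (PySem.List.pyGetD e 0 "" != "") && (PySem.List.pyGetD e 1 "" != "")

def borrow_alt (friends : List (List String)) : List (String × List String) :=
  let keys : List String := friends.foldl
    (fun ks e =>
      if borrowValidB e && !(ks.contains (PySem.List.pyGetD e 0 "")) then
        ks ++ [PySem.List.pyGetD e 0 ""]
      else ks) []
  keys.map (fun f =>
    (f, (friends.filter (fun e => borrowValidB e && (PySem.List.pyGetD e 0 "" == f))).map
          (fun e => PySem.List.pyGetD e 1 "")))

-- ===== PRECONDITION & SPEC =====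
def Spec_borrow (friends : List (List String)) (out : List (String × List String)) : Prop := out = borrow_alt friends
instance (friends : List (List String)) (out : List (String × List String)) : Decidable (Spec_borrow friends out) := by unfold Spec_borrow; infer_instance

-- ===== CLAIM (what is proved, stated in full; the proofs are below) =====
def Claim_equal_borrow : Prop := ∀ (friends : List (List String)), Dom_borrow friends → Spec_borrow friends (borrow friends)

-- ===== LEMMAS AND PROOFS =====

/-- A valid entry as the (friend, movie) pair it contributes; none = skipped. -/
def borrowPair (e : List String) : Option (String × String) :=
  if borrowValidB e then some (PySem.List.pyGetD e 0 "", PySem.List.pyGetD e 1 "") else none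

theorem borrowPair_pos (e : List String) (h : borrowValidB e = true) :
    borrowPair e = some (PySem.List.pyGetD e 0 "", PySem.List.pyGetD e 1 "") := by
  simp [borrowPair, h]

theorem borrowPair_neg (e : List String) (h : ¬ borrowValidB e = true) :
    borrowPair e = none := by
  simp [borrowPair, h]

theorem borrowStepA_eq (d : PySem.Dict String (List String)) (e : List String) :
    borrowStepA d e = match borrowPair e with
      | some p => d.modify p.1 [] (· ++ [p.2])
      | none => d := by
  match e with
  | [] => simp [borrowStepA, borrowPair, borrowValidB]
  | [a] => simp [borrowStepA, borrowPair, borrowValidB]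
  | a :: b :: rest =>
      have h0 : PySem.List.pyGet? (a :: b :: rest) 0 = some a :=
        PySem.List.pyGet?_zero_cons a (b :: rest)
      have h1 : PySem.List.pyGet? (a :: b :: rest) 1 = some b := by
        rw [show (1 : Int) = ((1 : Nat) : Int) from rfl, PySem.List.pyGet?_natCast]
        rfl
      have g0 : PySem.List.pyGetD (a :: b :: rest) 0 "" = a := by
        simp [PySem.List.pyGetD]
      have g1 : PySem.List.pyGetD (a :: b :: rest) 1 "" = b := by
        simp [PySem.List.pyGetD]
      simp only [borrowStepA, borrowPair, borrowValidB, h0, h1, g0, g1]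
      by_cases ha : a = "" <;> by_cases hb : b = "" <;> simp [ha, hb]

theorem borrow_foldA (l : List (List String)) (d : PySem.Dict String (List String)) :
    l.foldl borrowStepA d =
      (l.filterMap borrowPair).foldl (fun d p => d.modify p.1 [] (· ++ [p.2])) d := by
  induction l generalizing d with
  | nil => rfl
  | cons e l ih =>
      simp only [List.foldl_cons, List.filterMap_cons, borrowStepA_eq]
      cases h : borrowPair e <;> simp [ih]

theorem borrow_keysB (l : List (List String)) (ks : List String) :
    l.foldl (fun ks e =>
        if borrowValidB e && !(ks.contains (PySem.List.pyGetD e 0 "")) then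
          ks ++ [PySem.List.pyGetD e 0 ""] else ks) ks =
      PySem.Set.update ks ((l.filterMap borrowPair).map (·.1)) := by
  induction l generalizing ks with
  | nil => rfl
  | cons e l ih =>
      rw [List.foldl_cons, List.filterMap_cons]
      by_cases hv : borrowValidB e = true
      · rw [borrowPair_pos e hv]
        by_cases hm : PySem.List.pyGetD e 0 "" ∈ ks
        · rw [if_neg (by simp [hv, hm]), ih]
          simp [PySem.Set.update_cons, PySem.Set.add_of_mem hm]
        · rw [if_pos (by simp [hv, hm]), ih]
          simp [PySem.Set.update_cons, PySem.Set.add_of_not_mem hm]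
      · rw [borrowPair_neg e hv, if_neg (by simp [hv]), ih]

theorem borrow_filterB (l : List (List String)) (f : String) :
    (l.filter (fun e => borrowValidB e && (PySem.List.pyGetD e 0 "" == f))).map
        (fun e => PySem.List.pyGetD e 1 "") =
      ((l.filterMap borrowPair).filter (fun p => p.1 == f)).map (·.2) := by
  induction l with
  | nil => rfl
  | cons e l ih =>
      rw [List.filter_cons, List.filterMap_cons]
      by_cases hv : borrowValidB e = true
      · rw [borrowPair_pos e hv]
        by_cases hf : PySem.List.pyGetD e 0 "" = f
        · simp [hv, hf, ih]
        · simp [hv, hf, ih]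
      · rw [borrowPair_neg e hv]
        simp [hv, ih]

-- ===== VERDICT (by name: the statement is the Claim_ definition above) =====
theorem borrow_spec : Claim_equal_borrow := by
  intro friends _
  unfold Spec_borrow
  have hB : borrow_alt friends =
      (PySem.Set.ofList ((friends.filterMap borrowPair).map (fun p => p.1))).map
        (fun f => (f, ((friends.filterMap borrowPair).filter (fun p => p.1 == f)).map
          (fun p => p.2))) := by
    unfold borrow_alt
    rw [borrow_keysB]
    rw [PySem.Set.update_nil_left]
    apply List.map_congr_left
    intro f _
    rw [borrow_filterB]
  have hA : borrow friends =
      (PySem.Set.ofList ((friends.filterMap borrowPair).map (fun p => p.1))).map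
        (fun f => (f, ((friends.filterMap borrowPair).filter (fun p => p.1 == f)).map
          (fun p => p.2))) := by
    unfold borrow
    rw [borrow_foldA]
    have hnd : ((friends.filterMap borrowPair).foldl
        (fun d p => d.modify p.1 [] (· ++ [p.2])) PySem.Dict.empty).keys.Nodup :=
      PySem.Dict.nodup_keys_foldl_modify_key (friends.filterMap borrowPair)
        (fun p => p.1) [] (fun d p x => x ++ [p.2]) PySem.Dict.empty (by simp)
    rw [PySem.Dict.items_eq_map_keys _ hnd []]
    rw [PySem.Dict.keys_foldl_modify_key (friends.filterMap borrowPair)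
      (fun p => p.1) [] (fun d p x => x ++ [p.2]) PySem.Dict.empty]
    simp only [PySem.Dict.keys_empty, PySem.Set.update_nil_left, List.map_map]
    apply List.map_congr_left
    intro k _
    rw [Function.comp_apply, PySem.Dict.getD_foldl_modify_append]
    simp
  rw [hA, hB]
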